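-- pv_equiv track=rewrite | github.com/Lucasmac23/TimingFileCompilingFactorial2 | contrastCombinator.py | recursiveContrastCombo
-- ===== SOURCE A (Python) =====
-- def recursiveContrastCombo(inputList):
--     """
--     :param inputList:
--     :return: recursively constructed output List
--     """
--     i=0
--     j=1
--     outputList=[]
--     if len(inputList)==2:
--         output = withinListContrastCombinations([inputList[i]] + inputList[j:], True)
--         outputList += output
--     while j<len(inputList):
--         outputList=withinListContrastCombinations(inputList, True)
--         while i < len(outputList):
--             if j < len(inputList)-1:
--                 output=withinListContrastCombinations([outputList[i]]+inputList[j+1:], True)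
--                 outputList+=output
--                 j+=1
--                 i+=1
--             else:
--                 return outputList
--     return outputList
--
-- def withinListContrastCombinations(inputList, recursiveCall=False):
--     """
--
--     :param inputList: 1d List of strings
--     :param recursiveCall: Boolean to check if this function is called using the recursive helper function
--     :return: returns a list with all possible combinations of the given list (e.g., if input was ["a","b","c"]
--             output would be ["a_b", "a_b_c", "a_c", "b_c"]
--     """
--     i = 0
--     j=1
--     outputList=[]
--     if recursiveCall:
--         k=j
--         while k<len(inputList):
--             outputList.append("_".join([inputList[i]] + [inputList[k]]))
--             k+=1
--     else:
--         while i < len(inputList)-1: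
--             k = j
--             while k < len(inputList):
--                 outputList.append("_".join([inputList[i]] + [inputList[k]]))
--                 if k+1!=len(inputList) and recursiveCall==False:
--                     output1=recursiveContrastCombo([outputList[-1]]+inputList[k+1:])
--                     output2=[]
--                     for thing in output1:
--                         output2+=recursiveContrastCombo([thing]+inputList[k+2:])
--                     outputList+=output1
--                     outputList+=output2
--
--                 k += 1
--             i += 1
--             j+=1
--     return outputList
-- ===== SOURCE B (Python) =====
-- def recursiveContrastCombo(inputList):
--     n = len(inputList)
--     if n < 2:
--         return []
--     pairs = [inputList[0] + "_" + inputList[k] for k in range(1, n)]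
--     triples = [inputList[0] + "_" + inputList[i + 1] + "_" + inputList[m]
--                for i in range(n - 2) for m in range(i + 2, n)]
--     return pairs + triples
-- ===== Notes on version B (the rewrite author's own statement) =====
-- stated objective: simpler
-- what changed: Replaced the tangled mutually-recursive pair of functions (with mutation of the list while iterating over it) by one flat function: a comprehension for the pairs and two nested ranges for the triples.
import Mathlib
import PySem

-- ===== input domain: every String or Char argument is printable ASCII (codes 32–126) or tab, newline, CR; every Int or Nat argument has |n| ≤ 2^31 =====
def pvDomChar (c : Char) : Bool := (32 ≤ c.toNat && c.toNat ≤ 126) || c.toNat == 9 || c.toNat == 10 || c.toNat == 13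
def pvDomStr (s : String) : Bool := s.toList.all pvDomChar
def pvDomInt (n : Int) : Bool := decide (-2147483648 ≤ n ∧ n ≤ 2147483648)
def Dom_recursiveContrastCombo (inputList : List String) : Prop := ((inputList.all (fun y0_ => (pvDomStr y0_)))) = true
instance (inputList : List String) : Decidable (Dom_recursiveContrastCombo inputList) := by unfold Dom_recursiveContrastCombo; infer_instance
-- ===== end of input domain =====

-- B replaces the tangled mutually-recursive pair of helpers (which mutate the list
-- while iterating over it) by one flat function: pairs, then triples via nested ranges.


-- ===== PORT A =====
-- withinListContrastCombinations(l, True): the k-while loop (only the recursiveCall=True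
-- branch is ever taken by recursiveContrastCombo).  l[0] and l[k] are only read when
-- k < len(l) (so both indices are in range); getD is exact there.
def pvA_withinK (l : List String) (k : Nat) (out : List String) : List String :=
  if k < l.length then
    pvA_withinK l (k + 1) (out ++ [l.getD 0 "" ++ "_" ++ l.getD k ""])
  else out
termination_by l.length - k

def pvA_within (l : List String) : List String := pvA_withinK l 1 []

-- the inner `while i < len(outputList)` loop of recursiveContrastCombo; j increments
-- towards len-1, which bounds the recursion.  The `else out` on i ≥ len(outputList)
-- is Python falling through to the outer `while j < len(inputList)` re-check with an
-- unchanged state (outputList is reset to the same value), i.e. Python loops forever;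
-- this branch is unreachable whenever the loop is entered (i = 0 < len, proved below).
def pvA_inner (l : List String) (i j : Nat) (out : List String) : List String :=
  if i < out.length then
    if j < l.length - 1 then
      pvA_inner l (i + 1) (j + 1) (out ++ pvA_within (out.getD i "" :: l.drop (j + 1)))
    else out
  else out
termination_by l.length - 1 - j

def recursiveContrastCombo (inputList : List String) : List String :=
  let i := 0
  let j := 1
  let outputList : List String := []
  let outputList :=
    if inputList.length == 2 then
      outputList ++ pvA_within (inputList.getD 0 "" :: inputList.drop 1)
    else outputList
  if j < inputList.length then
    pvA_inner inputList i j (pvA_within inputList)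
  else outputList

-- ===== PORT B =====
def recursiveContrastCombo_alt (inputList : List String) : List String :=
  let n := inputList.length
  if n < 2 then []
  else
    let pairs := (List.range' 1 (n - 1)).map
      (fun k => inputList.getD 0 "" ++ "_" ++ inputList.getD k "")
    let triples := (List.range (n - 2)).flatMap (fun i =>
      (List.range' (i + 2) (n - (i + 2))).map
        (fun m => inputList.getD 0 "" ++ "_" ++ inputList.getD (i + 1) "" ++ "_" ++ inputList.getD m ""))
    pairs ++ triples

-- ===== PRECONDITION & SPEC =====
def Spec_recursiveContrastCombo (inputList : List String) (out : List String) : Prop := out = recursiveContrastCombo_alt inputList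
instance (inputList : List String) (out : List String) : Decidable (Spec_recursiveContrastCombo inputList out) := by unfold Spec_recursiveContrastCombo; infer_instance

-- ===== CLAIM (what is proved, stated in full; the proofs are below) =====
def Claim_equal_recursiveContrastCombo : Prop := ∀ (inputList : List String), Dom_recursiveContrastCombo inputList → Spec_recursiveContrastCombo inputList (recursiveContrastCombo inputList)

-- ===== LEMMAS AND PROOFS =====

-- the k-while loop produces out ++ the mapped tail of range'
theorem pvA_withinK_eq (l : List String) (k : Nat) (out : List String) :
    pvA_withinK l k out =
      out ++ (List.range' k (l.length - k)).map
        (fun t => l.getD 0 "" ++ "_" ++ l.getD t "") := by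
  by_cases h : k < l.length
  · rw [pvA_withinK, if_pos h, pvA_withinK_eq l (k + 1)]
    have hl : l.length - k = (l.length - (k + 1)) + 1 := by omega
    rw [hl, List.range'_succ, List.map_cons, List.append_assoc]
    rfl
  · rw [pvA_withinK, if_neg h]
    have : l.length - k = 0 := by omega
    simp [this]
termination_by l.length - k

theorem pvA_within_eq (l : List String) :
    pvA_within l = (List.range' 1 (l.length - 1)).map
      (fun t => l.getD 0 "" ++ "_" ++ l.getD t "") := by
  simp [pvA_within, pvA_withinK_eq]

-- the pairs list of l
def pvPairs (l : List String) : List String :=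
  (List.range' 1 (l.length - 1)).map (fun t => l.getD 0 "" ++ "_" ++ l.getD t "")

-- triples with first inner index t, for t ≥ i
def pvTrips (l : List String) (i : Nat) : List String :=
  (List.range' i (l.length - 2 - i)).flatMap (fun t =>
    (l.drop (t + 2)).map (fun x => l.getD 0 "" ++ "_" ++ l.getD (t + 1) "" ++ "_" ++ x))

theorem pvPairs_getD (l : List String) (i : Nat) (hi : i < l.length - 1) :
    (pvPairs l).getD i "" = l.getD 0 "" ++ "_" ++ l.getD (i + 1) "" := by
  unfold pvPairs
  have h1 : i < (List.range' 1 (l.length - 1)).length := by simp; omega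
  rw [List.getD_eq_getElem?_getD, List.getElem?_map, List.getElem?_eq_getElem h1]
  simp [List.getElem_range', Nat.add_comm]

theorem pvA_inner_eq (l : List String) (i : Nat) (acc : List String)
    (hi : i ≤ l.length - 2) (h2 : 2 ≤ l.length) :
    pvA_inner l i (i + 1) (pvPairs l ++ acc) = pvPairs l ++ acc ++ pvTrips l i := by
  have hlen : (pvPairs l).length = l.length - 1 := by
    simp [pvPairs]
  have hcond : i < (pvPairs l ++ acc).length := by
    simp [hlen]; omega
  rw [pvA_inner, if_pos hcond]
  by_cases hj : i + 1 < l.length - 1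
  · rw [if_pos hj]
    have hgd : (pvPairs l ++ acc).getD i "" = l.getD 0 "" ++ "_" ++ l.getD (i + 1) "" := by
      rw [List.getD_eq_getElem?_getD, List.getElem?_append_left (by simp [hlen]; omega),
        ← List.getD_eq_getElem?_getD, pvPairs_getD l i (by omega)]
    have hwithin : pvA_within ((pvPairs l ++ acc).getD i "" :: l.drop (i + 1 + 1)) =
        (l.drop (i + 2)).map
          (fun x => l.getD 0 "" ++ "_" ++ l.getD (i + 1) "" ++ "_" ++ x) := by
      rw [hgd, pvA_within_eq]
      have hl : (((l.getD 0 "" ++ "_" ++ l.getD (i + 1) "") :: l.drop (i + 2)) : List String).length - 1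
          = (l.drop (i + 2)).length := by simp
      rw [hl]
      apply List.ext_getElem (by simp)
      intro t ht1 ht2
      simp only [List.length_map] at ht2
      simp only [List.getElem_map, List.getElem_range']
      rw [show 1 + 1 * t = t + 1 by omega]
      simp only [List.getD_cons_zero, List.getD_cons_succ]
      congr 1
      rw [List.getD_eq_getElem?_getD, List.getElem?_eq_getElem ht2]
      simp
    rw [hwithin]
    have := pvA_inner_eq l (i + 1) (acc ++ (l.drop (i + 2)).map
      (fun x => l.getD 0 "" ++ "_" ++ l.getD (i + 1) "" ++ "_" ++ x)) (by omega) h2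
    rw [List.append_assoc] at *
    rw [this]
    have htr : pvTrips l i = (l.drop (i + 2)).map
        (fun x => l.getD 0 "" ++ "_" ++ l.getD (i + 1) "" ++ "_" ++ x) ++ pvTrips l (i + 1) := by
      unfold pvTrips
      have : l.length - 2 - i = (l.length - 2 - (i + 1)) + 1 := by omega
      rw [this, List.range'_succ, List.flatMap_cons]
    rw [htr]
    simp
  · rw [if_neg hj]
    have : pvTrips l i = [] := by
      unfold pvTrips
      have : l.length - 2 - i = 0 := by omega
      simp [this]
    simp [this]
termination_by l.length - 2 - i

theorem drop_eq_range'_map (l : List String) (a : Nat) :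
    (List.range' a (l.length - a)).map (fun m => l.getD m "") = l.drop a := by
  apply List.ext_getElem (by simp)
  intro t ht1 ht2
  simp only [List.length_map, List.length_range'] at ht1
  simp only [List.length_drop] at ht2
  simp only [List.getElem_map, List.getElem_range', List.getElem_drop]
  rw [List.getD_eq_getElem?_getD, List.getElem?_eq_getElem (by omega)]
  simp

-- ===== VERDICT (by name: the statement is the Claim_ definition above) =====
theorem recursiveContrastCombo_spec : Claim_equal_recursiveContrastCombo := by
  unfold Claim_equal_recursiveContrastCombo Spec_recursiveContrastCombo
  intro l _
  by_cases h2 : 2 ≤ l.length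
  · unfold recursiveContrastCombo recursiveContrastCombo_alt
    rw [if_pos (by omega), if_neg (by omega)]
    have h0 : pvA_within l = pvPairs l ++ ([] : List String) := by
      rw [pvA_within_eq, pvPairs, List.append_nil]
    rw [h0, pvA_inner_eq l 0 [] (by omega) h2, List.append_nil]
    congr 1
    unfold pvTrips
    rw [Nat.sub_zero, ← List.range_eq_range']
    simp only [List.flatMap_def]
    congr 1
    apply List.map_congr_left
    intro t _
    rw [← drop_eq_range'_map l (t + 2), List.map_map]
    rfl
  · have hsm : l = [] ∨ ∃ x, l = [x] := by
      match l with
      | [] => exact Or.inl rfl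
      | [x] => exact Or.inr ⟨x, rfl⟩
      | x :: y :: t => simp at h2
    rcases hsm with rfl | ⟨x, rfl⟩
    · rfl
    · rfl
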